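-- pv_equiv track=rewrite | github.com/Julie-QWQ/image-saliency-ranking-based-on-superpixels | src/superpixel.py | n_ring_neighbors
-- ===== SOURCE A (Python) =====
-- def n_ring_neighbors(adjacency, node, n_ring):
--     visited = {node}
--     frontier = {node}
--     for _ in range(n_ring):
--         next_frontier = set()
--         for u in frontier:
--             for v in adjacency.get(u, []):
--                 if v not in visited:
--                     visited.add(v)
--                     next_frontier.add(v)
--         frontier = next_frontier
--     visited.remove(node)
--     return visited
-- ===== SOURCE B (Python) =====
-- def _rings(adjacency, seen, frontier, k):
--     # Emit the next ring as an ordered list, then recurse; stops as soon as a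
--     # ring is empty or k rings have been emitted.
--     if k <= 0 or not frontier:
--         return []
--     fresh = []
--     for u in frontier:
--         for v in adjacency.get(u, []):
--             if v not in seen and v not in fresh:
--                 fresh.append(v)
--     return fresh + _rings(adjacency, seen + fresh, fresh, k - 1)
--
-- def n_ring_neighbors(adjacency, node, n_ring):
--     # Recursive ring decomposition: the answer is the concatenation of rings 1..n_ring.
--     return set(_rings(adjacency, [node], [node], n_ring))
-- ===== Notes on version B (the rewrite author's own statement) =====
-- stated objective: alternative
-- what changed: Replaces A's imperative loop over range(n_ring) mutating visited/frontier sets (then deleting the start node) by a pure recursion that emits each ring as an ordered list, deduplicates against lists, stops early when a ring is empty, and returns the rings concatenated.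
import Mathlib
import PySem

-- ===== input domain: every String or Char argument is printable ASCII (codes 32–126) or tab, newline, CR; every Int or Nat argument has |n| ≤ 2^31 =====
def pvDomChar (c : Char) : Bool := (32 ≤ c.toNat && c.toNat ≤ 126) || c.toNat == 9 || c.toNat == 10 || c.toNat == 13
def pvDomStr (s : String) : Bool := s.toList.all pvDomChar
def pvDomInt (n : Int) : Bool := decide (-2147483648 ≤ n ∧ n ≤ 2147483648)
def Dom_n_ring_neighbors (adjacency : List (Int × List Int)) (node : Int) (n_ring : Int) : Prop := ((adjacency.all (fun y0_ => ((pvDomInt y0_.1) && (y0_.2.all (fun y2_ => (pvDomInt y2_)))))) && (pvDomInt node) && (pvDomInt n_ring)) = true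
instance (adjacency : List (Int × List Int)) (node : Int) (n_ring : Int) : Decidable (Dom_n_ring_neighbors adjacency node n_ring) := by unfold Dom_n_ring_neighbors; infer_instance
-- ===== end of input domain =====

-- B replaces A's counted loop mutating visited/frontier sets by a pure recursion that
-- emits each ring as an ordered list and returns the rings concatenated (alternative
-- decomposition, same exact result).

-- ===== PORT A =====
-- A-side helper: the body of A's inner loop "for v in adjacency.get(u, []): …"
def expandA (adj : PySem.Dict Int (List Int)) (st : PySem.Set Int × PySem.Set Int) (u : Int) :
    PySem.Set Int × PySem.Set Int :=
  (adj.getD u []).foldl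
    (fun st3 v =>
      if PySem.Set.contains st3.1 v then st3
      else (PySem.Set.add st3.1 v, PySem.Set.add st3.2 v))
    st

def n_ring_neighbors (adjacency : List (Int × List Int)) (node : Int) (n_ring : Int) : List Int :=
  let adj : PySem.Dict Int (List Int) := PySem.Dict.mk adjacency
  -- visited = {node}; frontier = {node}; for _ in range(n_ring): one round over the frontier
  let st := (PySem.List.pyRange 0 n_ring 1).foldl
    (fun (st : PySem.Set Int × PySem.Set Int) _ =>
      st.2.foldl (expandA adj) (st.1, PySem.Set.empty))
    (PySem.Set.ofList [node], PySem.Set.ofList [node])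
  -- visited.remove(node): node ∈ visited always, so remove? is always some; .getD only for totality
  (PySem.Set.remove? st.1 node).getD st.1

-- ===== PORT B =====
-- B-side helper: one ring, Source B's "for u in frontier: for v in adjacency.get(u, []): …"
def freshRing (adj : PySem.Dict Int (List Int)) (seen frontier : List Int) : List Int :=
  frontier.foldl
    (fun fresh u =>
      (adj.getD u []).foldl
        (fun fresh v =>
          if seen.contains v || fresh.contains v then fresh else fresh ++ [v])
        fresh)
    []

-- Source B's recursive helper _rings (structural recursion on k.toNat)
def ringsRec (adj : PySem.Dict Int (List Int)) (seen frontier : List Int) (k : Int) : List Int :=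
  if k ≤ 0 ∨ frontier = [] then []
  else
    let fresh := freshRing adj seen frontier
    fresh ++ ringsRec adj (seen ++ fresh) fresh (k - 1)
termination_by k.toNat
decreasing_by omega

def n_ring_neighbors_alt (adjacency : List (Int × List Int)) (node : Int) (n_ring : Int) : List Int :=
  PySem.Set.ofList (ringsRec (PySem.Dict.mk adjacency) [node] [node] n_ring)

-- ===== PRECONDITION & SPEC =====
def Spec_n_ring_neighbors (adjacency : List (Int × List Int)) (node : Int) (n_ring : Int) (out : List Int) : Prop := out = n_ring_neighbors_alt adjacency node n_ring
instance (adjacency : List (Int × List Int)) (node : Int) (n_ring : Int) (out : List Int) : Decidable (Spec_n_ring_neighbors adjacency node n_ring out) := by unfold Spec_n_ring_neighbors; infer_instance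

-- ===== CLAIM (what is proved, stated in full; the proofs are below) =====
def Claim_equal_n_ring_neighbors : Prop := ∀ (adjacency : List (Int × List Int)) (node : Int) (n_ring : Int), Dom_n_ring_neighbors adjacency node n_ring → Spec_n_ring_neighbors adjacency node n_ring (n_ring_neighbors adjacency node n_ring)

-- ===== LEMMAS AND PROOFS =====

-- A's round sequence as an explicit recursion on the number of rounds.
def stepRound (adj : PySem.Dict Int (List Int)) (st : PySem.Set Int × PySem.Set Int) :
    PySem.Set Int × PySem.Set Int :=
  st.2.foldl (expandA adj) (st.1, PySem.Set.empty)

def rounds (adj : PySem.Dict Int (List Int)) :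
    Nat → PySem.Set Int × PySem.Set Int → PySem.Set Int × PySem.Set Int
  | 0, st => st
  | k + 1, st => rounds adj k (stepRound adj st)

-- A's 'for _ in range(n_ring)' fold is the round recursion.
lemma foldl_rounds (adj : PySem.Dict Int (List Int)) :
    ∀ (l : List Int) (init : PySem.Set Int × PySem.Set Int),
      l.foldl (fun st _ => st.2.foldl (expandA adj) (st.1, PySem.Set.empty)) init
        = rounds adj l.length init := by
  intro l
  induction l with
  | nil => intro init; rfl
  | cons x t ih => intro init; simpa [rounds] using ih (stepRound adj init)

-- One u's neighbour-list fold: A's set state (V ++ f, f) grows exactly like B's fresh list f.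
lemma inner_rel (V : List Int) (ws : List Int) :
    ∀ (f : List Int), (V ++ f).Nodup →
      ws.foldl
          (fun st3 v =>
            if PySem.Set.contains st3.1 v then st3
            else (PySem.Set.add st3.1 v, PySem.Set.add st3.2 v))
          (V ++ f, f)
        = (V ++ ws.foldl
              (fun fresh v =>
                if V.contains v || fresh.contains v then fresh else fresh ++ [v]) f,
           ws.foldl
              (fun fresh v =>
                if V.contains v || fresh.contains v then fresh else fresh ++ [v]) f) ∧
      (V ++ ws.foldl
          (fun fresh v =>
            if V.contains v || fresh.contains v then fresh else fresh ++ [v]) f).Nodup := by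
  induction ws with
  | nil => intro f h; exact ⟨rfl, h⟩
  | cons w t ih =>
    intro f h
    by_cases hw : w ∈ V ++ f
    · have hm : w ∈ V ∨ w ∈ f := List.mem_append.1 hw
      simpa [hm] using ih f h
    · have hm : ¬ (w ∈ V ∨ w ∈ f) := by simpa [List.mem_append] using hw
      have hadd1 : PySem.Set.add (V ++ f) w = V ++ (f ++ [w]) := by
        rw [PySem.Set.add_of_not_mem hw, List.append_assoc]
      have hwf : w ∉ f := fun hm => hw (List.mem_append.2 (Or.inr hm))
      have hadd2 : PySem.Set.add f w = f ++ [w] := PySem.Set.add_of_not_mem hwf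
      have h' : (V ++ (f ++ [w])).Nodup := by
        rw [← List.append_assoc]
        refine List.Nodup.append h (List.nodup_singleton w) ?_
        intro a ha hb
        simp only [List.mem_singleton] at hb
        exact hw (hb ▸ ha)
      simpa [hm, hadd1, hadd2] using ih (f ++ [w]) h'
  
-- One full round: A's frontier fold starting at (V, ∅) produces exactly (V ++ ring, ring)
-- where ring is B's freshRing — stated with a general fresh accumulator f for the induction.
lemma round_rel (adj : PySem.Dict Int (List Int)) (V : List Int) :
    ∀ (fr f : List Int), (V ++ f).Nodup →
      fr.foldl (expandA adj) (V ++ f, f)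
        = (V ++ fr.foldl
              (fun fresh u =>
                (adj.getD u []).foldl
                  (fun fresh v =>
                    if V.contains v || fresh.contains v then fresh else fresh ++ [v])
                  fresh) f,
           fr.foldl
              (fun fresh u =>
                (adj.getD u []).foldl
                  (fun fresh v =>
                    if V.contains v || fresh.contains v then fresh else fresh ++ [v])
                  fresh) f) ∧
      (V ++ fr.foldl
          (fun fresh u =>
            (adj.getD u []).foldl
              (fun fresh v =>
                if V.contains v || fresh.contains v then fresh else fresh ++ [v])
              fresh) f).Nodup := by
  intro fr
  induction fr with
  | nil => intro f h; exact ⟨rfl, h⟩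
  | cons u t ih =>
    intro f h
    obtain ⟨h1, h2⟩ := inner_rel V (adj.getD u []) f h
    have hstep : expandA adj (V ++ f, f) u
        = (V ++ (adj.getD u []).foldl
              (fun fresh v =>
                if V.contains v || fresh.contains v then fresh else fresh ++ [v]) f,
           (adj.getD u []).foldl
              (fun fresh v =>
                if V.contains v || fresh.contains v then fresh else fresh ++ [v]) f) := by
      simpa [expandA] using h1
    simpa [hstep] using ih _ h2

-- rounds with an empty frontier change nothing
lemma rounds_empty (adj : PySem.Dict Int (List Int)) (V : List Int) :
    ∀ k : Nat, rounds adj k (V, []) = (V, []) := by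
  intro k
  induction k with
  | zero => rfl
  | succ k ih => simpa [rounds, stepRound] using ih

-- Main simulation: k of A's rounds from (V, fr) accumulate exactly B's rings.
lemma rounds_rings (adj : PySem.Dict Int (List Int)) :
    ∀ (k : Nat) (V fr : List Int), V.Nodup →
      (rounds adj k (V, fr)).1 = V ++ ringsRec adj V fr (k : Int) ∧
      (V ++ ringsRec adj V fr (k : Int)).Nodup := by
  intro k
  induction k with
  | zero =>
    intro V fr h
    have h0 : ringsRec adj V fr ((0 : Nat) : Int) = [] := by rw [ringsRec]; simp
    rw [h0]
    exact ⟨by simp [rounds], by simpa using h⟩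
  | succ k ih =>
    intro V fr h
    by_cases hfr : fr = []
    · subst hfr
      rw [ringsRec]
      simp only [or_true, if_pos]
      exact ⟨by rw [rounds_empty]; simp, by simpa using h⟩
    · have h0 : (V ++ ([] : List Int)).Nodup := by simpa using h
      obtain ⟨h1, h2⟩ := round_rel adj V fr [] h0
      have hstep : stepRound adj (V, fr) = (V ++ freshRing adj V fr, freshRing adj V fr) := by
        have : V ++ ([] : List Int) = V := by simp
        simpa [stepRound, freshRing, this] using h1
      have hnd : (V ++ freshRing adj V fr).Nodup := by
        simpa [freshRing] using h2
      obtain ⟨ih1, ih2⟩ := ih (V ++ freshRing adj V fr) (freshRing adj V fr) hnd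
      have hunf : ringsRec adj V fr ((k + 1 : Nat) : Int)
          = freshRing adj V fr
            ++ ringsRec adj (V ++ freshRing adj V fr) (freshRing adj V fr) ((k : Nat) : Int) := by
        rw [ringsRec]
        have hk : ¬ ((k + 1 : Nat) : Int) ≤ 0 := by push_cast; omega
        have hc : ((k + 1 : Nat) : Int) - 1 = ((k : Nat) : Int) := by push_cast; ring
        simp [hfr]
      constructor
      · show (rounds adj k (stepRound adj (V, fr))).1 = _
        rw [hstep, ih1, hunf, List.append_assoc]
      · rw [hunf, ← List.append_assoc]
        exact ih2

-- ===== VERDICT (by name: the statement is the Claim_ definition above) =====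
theorem n_ring_neighbors_spec : Claim_equal_n_ring_neighbors := by
  intro adjacency node n_ring _
  unfold Spec_n_ring_neighbors n_ring_neighbors n_ring_neighbors_alt
  simp only []
  have hlen : (PySem.List.pyRange 0 n_ring 1).length = n_ring.toNat := by simp [pysem]
  rw [foldl_rounds, hlen]
  have hof : PySem.Set.ofList [node] = [node] := rfl
  rw [hof]
  obtain ⟨h1, h2⟩ := rounds_rings (PySem.Dict.mk adjacency) n_ring.toNat [node] [node]
    (List.nodup_singleton node)
  -- the two k-arguments agree: for n_ring ≤ 0 both sides of ringsRec are []
  have hk : ringsRec (PySem.Dict.mk adjacency) [node] [node] ((n_ring.toNat : Nat) : Int)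
      = ringsRec (PySem.Dict.mk adjacency) [node] [node] n_ring := by
    by_cases hn : n_ring ≤ 0
    · rw [Int.toNat_of_nonpos hn]
      rw [ringsRec, ringsRec]
      simp [hn]
    · rw [Int.toNat_of_nonneg (by omega)]
  rw [hk] at h1 h2
  set R := ringsRec (PySem.Dict.mk adjacency) [node] [node] n_ring with hR
  have hmem : node ∈ ([node] ++ R : List Int) := by simp
  have hnotR : node ∉ R := by
    have := h2
    simp only [List.singleton_append, List.nodup_cons] at this
    exact this.1
  have hndR : R.Nodup := by
    have := h2
    simp only [List.singleton_append, List.nodup_cons] at this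
    exact this.2
  rw [h1, PySem.Set.remove?_of_mem hmem]
  simp only [Option.getD_some]
  have hr : PySem.Set.ofList R = R := PySem.Set.ofList_eq_self_of_nodup R hndR
  rw [hr]
  -- discard ([node] ++ R) node = R since node ∉ R
  simp only [PySem.Set.discard, List.singleton_append]
  rw [List.filter_cons_of_neg (by simp)]
  apply List.filter_eq_self.2
  intro a ha
  simpa using fun he : a = node => hnotR (he ▸ ha)
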